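-- pv_equiv track=rewrite | github.com/makefunstuff/el-stupido | tools/esbc.py | _find_ternary
-- ===== SOURCE A (Python) =====
-- def _find_ternary(expr):
--     """Find top-level ternary ? : respecting parens."""
--     depth = 0
--     qpos = -1
--     for i, c in enumerate(expr):
--         if c in "(":
--             depth += 1
--         elif c in ")":
--             depth -= 1
--         elif c == "?" and depth == 0:
--             qpos = i
--         elif c == ":" and depth == 0 and qpos >= 0:
--             return (
--                 expr[:qpos].strip(),
--                 expr[qpos + 1 : i].strip(),
--                 expr[i + 1 :].strip(),
--             )
--     return None
-- ===== SOURCE B (Python) =====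
-- def _find_ternary(expr):
--     """Find top-level ternary ? : respecting parens (two-pass: scan then select)."""
--     # pass 1: positions of every top-level '?' and ':'
--     marks = []
--     depth = 0
--     for i, c in enumerate(expr):
--         if c == "(":
--             depth += 1
--         elif c == ")":
--             depth -= 1
--         elif depth == 0 and c in "?:":
--             marks.append((i, c))
--     # pass 2: first ':' preceded by at least one '?'; split at the last such '?'
--     seen = []
--     for i, c in marks:
--         if c == ":":
--             qs = [j for j, d in seen if d == "?"]
--             if qs:
--                 q = qs[-1]
--                 return (expr[:q].strip(), expr[q + 1 : i].strip(), expr[i + 1 :].strip())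
--         seen.append((i, c))
--     return None
-- ===== Notes on version B (the rewrite author's own statement) =====
-- stated objective: alternative
-- what changed: A decides the ternary split inline in one scan carrying (depth, qpos); B separates scanning from selection: a first pass collects the positions of every top-level question-mark and colon marker, a second pass picks the first colon preceded by a question mark and splits at the last question mark before it.
import Mathlib
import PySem

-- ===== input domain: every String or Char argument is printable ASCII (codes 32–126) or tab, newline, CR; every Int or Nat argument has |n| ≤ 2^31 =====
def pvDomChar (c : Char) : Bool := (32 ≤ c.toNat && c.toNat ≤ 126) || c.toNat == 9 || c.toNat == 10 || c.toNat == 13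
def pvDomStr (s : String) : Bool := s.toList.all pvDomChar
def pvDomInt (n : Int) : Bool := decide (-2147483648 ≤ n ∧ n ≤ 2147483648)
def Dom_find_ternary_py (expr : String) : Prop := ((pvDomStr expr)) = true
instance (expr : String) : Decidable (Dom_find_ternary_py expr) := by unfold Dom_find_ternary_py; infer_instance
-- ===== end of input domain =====

-- B re-decomposes A's single inline scan into two passes (collect top-level markers, then select
-- the split pair); objective: alternative decomposition, same cost.

-- ===== PORT A =====
-- A's single loop over enumerate(expr) carrying (depth, qpos)
def ftLoopA (s : List Char) (items : List (Int × Char)) (depth qpos : Int) :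
    Option (String × String × String) :=
  match items with
  | [] => none
  | (i, c) :: rest =>
    if c = '(' then ftLoopA s rest (depth + 1) qpos
    else if c = ')' then ftLoopA s rest (depth - 1) qpos
    else if c = '?' ∧ depth = 0 then ftLoopA s rest depth i
    else if c = ':' ∧ depth = 0 ∧ qpos ≥ 0 then
      some (String.ofList (PySem.Chars.strip (PySem.List.slice s none (some qpos))),
            String.ofList (PySem.Chars.strip (PySem.List.slice s (some (qpos + 1)) (some i))),
            String.ofList (PySem.Chars.strip (PySem.List.slice s (some (i + 1)) none)))
    else ftLoopA s rest depth qpos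

def find_ternary_py (expr : String) : Option (String × String × String) :=
  ftLoopA expr.toList (PySem.List.enumerate expr.toList 0) 0 (-1)

-- ===== PORT B =====
-- pass 1: positions of every top-level '?' and ':'
def ftMarks (items : List (Int × Char)) (depth : Int) : List (Int × Char) :=
  match items with
  | [] => []
  | (i, c) :: rest =>
    if c = '(' then ftMarks rest (depth + 1)
    else if c = ')' then ftMarks rest (depth - 1)
    else if depth = 0 ∧ (c = '?' ∨ c = ':') then (i, c) :: ftMarks rest depth
    else ftMarks rest depth

-- pass 2: first ':' preceded by at least one '?'; split at the last such '?'
def ftSelect (s : List Char) (seen marks : List (Int × Char)) :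
    Option (String × String × String) :=
  match marks with
  | [] => none
  | (i, c) :: rest =>
    if c = ':' then
      let qs := (seen.filter (fun p => p.2 == '?')).map Prod.fst
      match qs.getLast? with
      | some q =>
          some (String.ofList (PySem.Chars.strip (PySem.List.slice s none (some q))),
                String.ofList (PySem.Chars.strip (PySem.List.slice s (some (q + 1)) (some i))),
                String.ofList (PySem.Chars.strip (PySem.List.slice s (some (i + 1)) none)))
      | none => ftSelect s (seen ++ [(i, c)]) rest
    else ftSelect s (seen ++ [(i, c)]) rest

def find_ternary_py_alt (expr : String) : Option (String × String × String) :=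
  ftSelect expr.toList [] (ftMarks (PySem.List.enumerate expr.toList 0) 0)

-- ===== PRECONDITION & SPEC =====
def Spec_find_ternary_py (expr : String) (out : Option (String × String × String)) : Prop := out = find_ternary_py_alt expr
instance (expr : String) (out : Option (String × String × String)) : Decidable (Spec_find_ternary_py expr out) := by unfold Spec_find_ternary_py; infer_instance

-- ===== CLAIM (what is proved, stated in full; the proofs are below) =====
def Claim_equal_find_ternary_py : Prop := ∀ (expr : String), Dom_find_ternary_py expr → Spec_find_ternary_py expr (find_ternary_py expr)

-- ===== LEMMAS AND PROOFS =====

-- the '?'-positions recorded in `seen`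
def ftQs (seen : List (Int × Char)) : List Int :=
  (seen.filter (fun p => p.2 == '?')).map Prod.fst

lemma enum_nonneg (xs : List Char) : ∀ (k : Int), 0 ≤ k →
    ∀ p ∈ PySem.List.enumerate xs k, 0 ≤ p.1 := by
  induction xs with
  | nil => intro k hk p hp; simp [PySem.List.enumerate_nil] at hp
  | cons x xs ih =>
    intro k hk p hp
    rw [PySem.List.enumerate_cons, List.mem_cons] at hp
    rcases hp with h | h
    · subst h; exact hk
    · exact ih (k + 1) (by omega) p h

lemma ftQs_append_q (seen : List (Int × Char)) (i : Int) :
    ftQs (seen ++ [(i, '?')]) = ftQs seen ++ [i] := by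
  simp [ftQs, List.filter_append]

lemma ftQs_append_other (seen : List (Int × Char)) (i : Int) (c : Char) (h : c ≠ '?') :
    ftQs (seen ++ [(i, c)]) = ftQs seen := by
  simp [ftQs, List.filter_append, h]

lemma ft_main (s : List Char) (items : List (Int × Char)) :
    ∀ (depth qpos : Int) (seen : List (Int × Char)),
    (∀ p ∈ items, 0 ≤ p.1) →
    (ftQs seen).getLast?.getD (-1) = qpos →
    (∀ x ∈ ftQs seen, 0 ≤ x) →
    ftLoopA s items depth qpos = ftSelect s seen (ftMarks items depth) := by
  induction items with
  | nil => intro depth qpos seen _ _ _; simp [ftLoopA, ftMarks, ftSelect]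
  | cons p rest ih =>
    intro depth qpos seen hnn hlast hpos
    obtain ⟨i, c⟩ := p
    have hnn' : ∀ q ∈ rest, 0 ≤ q.1 := fun q hq => hnn q (by simp [hq])
    have hi : 0 ≤ i := hnn (i, c) (by simp)
    by_cases h1 : c = '('
    · subst h1
      simpa [ftLoopA, ftMarks] using ih (depth + 1) qpos seen hnn' hlast hpos
    by_cases h2 : c = ')'
    · subst h2
      simpa [ftLoopA, ftMarks] using ih (depth - 1) qpos seen hnn' hlast hpos
    by_cases hd : depth = 0
    · subst hd
      by_cases h3 : c = '?'
      · -- A records qpos := i; B emits the mark and appends it to seen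
        subst h3
        have hlast' : (ftQs (seen ++ [(i, '?')])).getLast?.getD (-1) = i := by
          rw [ftQs_append_q, List.getLast?_concat]; rfl
        have hpos' : ∀ x ∈ ftQs (seen ++ [(i, '?')]), 0 ≤ x := by
          intro x hx
          rw [ftQs_append_q, List.mem_append] at hx
          rcases hx with h | h
          · exact hpos x h
          · simp at h; omega
        simpa [ftLoopA, ftMarks, ftSelect] using ih 0 i (seen ++ [(i, '?')]) hnn' hlast' hpos'
      by_cases h4 : c = ':'
      · subst h4
        rcases hq : (ftQs seen).getLast? with _ | q
        · -- no top-level '?' seen yet: A's qpos is -1, both sides continue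
          have hqp : qpos = -1 := by rw [← hlast, hq]; rfl
          have hlast' : (ftQs (seen ++ [(i, ':')])).getLast?.getD (-1) = qpos := by
            rwa [ftQs_append_other seen i ':' (by decide)]
          have hpos' : ∀ x ∈ ftQs (seen ++ [(i, ':')]), 0 ≤ x := by
            intro x hx; rw [ftQs_append_other seen i ':' (by decide)] at hx; exact hpos x hx
          have hq2 : Option.map Prod.fst (List.find? (fun p => p.2 == '?') seen.reverse) = none := by
            rw [show Option.map Prod.fst (List.find? (fun p => p.2 == '?') seen.reverse)
                  = (ftQs seen).getLast? from by simp [ftQs]]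
            exact hq
          simpa [ftLoopA, ftMarks, ftSelect, hq2, hqp]
            using ih 0 qpos (seen ++ [(i, ':')]) hnn' hlast' hpos'
        · -- last top-level '?' is at q: A returns using qpos, B using q; q = qpos
          have hqq : q = qpos := by rw [← hlast, hq]; rfl
          have hq0 : 0 ≤ qpos := hqq ▸ hpos q (List.mem_of_getLast? hq)
          have hq2 : Option.map Prod.fst (List.find? (fun p => p.2 == '?') seen.reverse) = some q := by
            rw [show Option.map Prod.fst (List.find? (fun p => p.2 == '?') seen.reverse)
                  = (ftQs seen).getLast? from by simp [ftQs]]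
            exact hq
          simp [ftLoopA, ftMarks, ftSelect, hq2, hqq, hq0]
      · -- ordinary character at top level: neither side acts
        have : ¬(c = '?' ∨ c = ':') := by rintro (h | h); exacts [h3 h, h4 h]
        simpa [ftLoopA, ftMarks, h1, h2, h3, h4, this]
          using ih 0 qpos seen hnn' hlast hpos
    · -- depth ≠ 0: '?' and ':' are inert on both sides
      simpa [ftLoopA, ftMarks, h1, h2, hd]
        using ih depth qpos seen hnn' hlast hpos

-- ===== VERDICT (by name: the statement is the Claim_ definition above) =====
theorem find_ternary_py_spec : Claim_equal_find_ternary_py := by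
  intro expr _
  unfold Spec_find_ternary_py find_ternary_py find_ternary_py_alt
  exact ft_main expr.toList (PySem.List.enumerate expr.toList 0) 0 (-1) []
    (enum_nonneg expr.toList 0 le_rfl) rfl (by intro x hx; simp [ftQs] at hx)
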